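-- pv_equiv track=rewrite | github.com/HOZH/leetCode | leetCodePython/599.minimum-index-sum-of-two-lists.py | findRestaurant
-- ===== SOURCE A (Python) =====
-- from typing import List
--
-- def findRestaurant(list1: List[str], list2: List[str]) -> List[str]:
--     #said order doesn't matter but still can't pass some of the  test cases with dict() approach
--     dic = dict()
--     for i in range(len(list1)):
--
--         dic[list1[i]]=i
--
--     answers = list()
--
--     for i in range(len(list2)):
--
--         if list2[i] in dic:
--
--             answers.append((dic[list2[i]]+i, list2[i]))
--
--     answers.sort()
--
--     if len(answers) == 0:
--         return []
--     first_weight = answers[0][0]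
--
--     final = list()
--
--     for i in answers:
--
--         if i[0] == first_weight:
--             final.append(i[1])
--         else:
--             break
--
--     return final
-- ===== SOURCE B (Python) =====
-- def findRestaurant(list1, list2):
--     dic = {name: i for i, name in enumerate(list1)}
--     best = None
--     bucket = []
--     for i, name in enumerate(list2):
--         if name in dic:
--             s = dic[name] + i
--             if best is None or s < best:
--                 best = s
--                 bucket = [name]
--             elif s == best:
--                 bucket.append(name)
--     return sorted(bucket)
-- ===== Notes on version B (the rewrite author's own statement) =====
-- stated objective: simpler
-- what changed: Instead of collecting all (index-sum, name) pairs, sorting that whole list and take-while-ing the minimal prefix, B keeps a running minimum sum and its bucket of names in one pass over list2 and only sorts the winning bucket.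
import Mathlib
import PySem

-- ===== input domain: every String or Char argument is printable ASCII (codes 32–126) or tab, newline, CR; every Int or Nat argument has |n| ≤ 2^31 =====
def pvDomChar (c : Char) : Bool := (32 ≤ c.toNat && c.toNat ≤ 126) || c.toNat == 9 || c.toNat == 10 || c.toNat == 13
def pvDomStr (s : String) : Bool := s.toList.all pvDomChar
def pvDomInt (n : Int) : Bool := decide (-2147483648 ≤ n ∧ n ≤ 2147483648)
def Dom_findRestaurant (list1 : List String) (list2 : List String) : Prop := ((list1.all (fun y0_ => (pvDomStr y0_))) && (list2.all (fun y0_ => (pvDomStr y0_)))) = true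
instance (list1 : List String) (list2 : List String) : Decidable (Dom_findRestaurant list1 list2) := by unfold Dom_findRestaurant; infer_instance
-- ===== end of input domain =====

-- B replaces A's sort-everything-then-take-prefix with a single running-minimum pass over list2
-- that keeps only the bucket of minimal-sum names and sorts just that bucket (objective: simpler).


-- ===== PORT A =====
-- 'for i in answers: if i[0] == first_weight: final.append(i[1]) else: break'
def pvTakeLoop (w : Int) : List (Int × String) → List String
  | [] => []
  | (s, n) :: t => if s = w then n :: pvTakeLoop w t else []

def findRestaurant (list1 : List String) (list2 : List String) : List String :=
  -- dic = dict(); for i in range(len(list1)): dic[list1[i]] = i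
  let dic : PySem.Dict String Int :=
    (PySem.List.enumerate list1).foldl (fun d p => d.insert p.2 p.1) PySem.Dict.empty
  -- answers = []; for i in range(len(list2)): if list2[i] in dic: answers.append((dic[list2[i]]+i, list2[i]))
  let answers : List (Int × String) :=
    (PySem.List.enumerate list2).foldl
      (fun acc p => if dic.contains p.2 then acc ++ [(dic.getD p.2 0 + p.1, p.2)] else acc) []
  -- answers.sort()  (tuples, lexicographic)
  let answers := PySem.List.sorted2 answers (fun t => t.1) (fun t => t.2)
  match answers with
  | [] => []                     -- if len(answers) == 0: return []
  | (w, _) :: _ => pvTakeLoop w answers   -- first_weight = answers[0][0]; loop with break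

-- ===== PORT B =====
-- one step of B's running-minimum loop, fed the computed (s, name)
def pvBestStep (st : Option Int × List String) (p : Int × String) : Option Int × List String :=
  match st.1 with
  | none => (some p.1, [p.2])
  | some b =>
    if p.1 < b then (some p.1, [p.2])
    else if p.1 = b then (some b, st.2 ++ [p.2])
    else st

def findRestaurant_alt (list1 : List String) (list2 : List String) : List String :=
  -- dic = {name: i for i, name in enumerate(list1)}
  let dic : PySem.Dict String Int :=
    (PySem.List.enumerate list1).foldl (fun d p => d.insert p.2 p.1) PySem.Dict.empty
  -- best = None; bucket = []; for i, name in enumerate(list2): …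
  let st :=
    (PySem.List.enumerate list2).foldl
      (fun st p => if dic.contains p.2 then pvBestStep st (dic.getD p.2 0 + p.1, p.2) else st)
      ((none : Option Int), ([] : List String))
  -- return sorted(bucket)
  PySem.List.sorted st.2 (fun x => x) false

-- ===== PRECONDITION & SPEC =====
def Spec_findRestaurant (list1 : List String) (list2 : List String) (out : List String) : Prop := out = findRestaurant_alt list1 list2
instance (list1 : List String) (list2 : List String) (out : List String) : Decidable (Spec_findRestaurant list1 list2 out) := by unfold Spec_findRestaurant; infer_instance

-- ===== CLAIM (what is proved, stated in full; the proofs are below) =====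
def Claim_equal_findRestaurant : Prop := ∀ (list1 : List String) (list2 : List String), Dom_findRestaurant list1 list2 → Spec_findRestaurant list1 list2 (findRestaurant list1 list2)

-- ===== LEMMAS AND PROOFS =====

def pvLexLe (a b : Int × String) : Prop := a.1 < b.1 ∨ (a.1 = b.1 ∧ a.2 ≤ b.2)

def pvLtB (a b : Int × String) : Bool := decide (a.1 < b.1) || (!decide (b.1 < a.1) && decide (a.2 < b.2))

theorem pvLex_of_true {a b : Int × String} (h : pvLtB a b = true) : pvLexLe a b := by
  unfold pvLtB at h; unfold pvLexLe
  rcases Bool.or_eq_true_iff.1 h with h1 | h2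
  · exact Or.inl (of_decide_eq_true h1)
  · rcases Bool.and_eq_true_iff.1 h2 with ⟨h3, h4⟩
    have hnb : ¬ b.1 < a.1 := of_decide_eq_false (by simpa using h3)
    have h4' : a.2 < b.2 := of_decide_eq_true h4
    by_cases h5 : a.1 < b.1
    · exact Or.inl h5
    · exact Or.inr ⟨le_antisymm (le_of_not_gt hnb) (le_of_not_gt h5), le_of_lt h4'⟩

theorem pvLex_of_false {a b : Int × String} (h : pvLtB a b = false) : pvLexLe b a := by
  unfold pvLtB at h; unfold pvLexLe
  rcases Bool.or_eq_false_iff.1 h with ⟨h1, h2⟩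
  have h1' : ¬ a.1 < b.1 := of_decide_eq_false h1
  rcases Bool.and_eq_false_iff.1 h2 with h3 | h4
  · exact Or.inl (of_decide_eq_true (by simpa using h3))
  · have h4' : ¬ a.2 < b.2 := of_decide_eq_false h4
    by_cases h5 : b.1 < a.1
    · exact Or.inl h5
    · exact Or.inr ⟨le_antisymm (le_of_not_gt h1') (le_of_not_gt h5), le_of_not_gt h4'⟩

theorem pvLexLe_trans {a b c : Int × String} (h1 : pvLexLe a b) (h2 : pvLexLe b c) : pvLexLe a c := by
  unfold pvLexLe at *
  rcases h1 with h1 | ⟨h1, h1'⟩ <;> rcases h2 with h2 | ⟨h2, h2'⟩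
  · exact Or.inl (lt_trans h1 h2)
  · exact Or.inl (h2 ▸ h1)
  · exact Or.inl (h1 ▸ h2)
  · exact Or.inr ⟨h1.trans h2, le_trans h1' h2'⟩

theorem pvInsertBy_pairwise (x : Int × String) (ys : List (Int × String))
    (h : ys.Pairwise pvLexLe) :
    (PySem.List.insertBy pvLtB x ys).Pairwise pvLexLe := by
  induction ys with
  | nil => simp [PySem.List.insertBy]
  | cons y t ih =>
    rcases List.pairwise_cons.1 h with ⟨hy, ht⟩
    by_cases hb : pvLtB x y = true
    · simp only [PySem.List.insertBy, hb, if_pos]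
      refine List.pairwise_cons.2 ⟨?_, h⟩
      intro z hz
      rcases List.mem_cons.1 hz with rfl | hz
      · exact pvLex_of_true hb
      · exact pvLexLe_trans (pvLex_of_true hb) (hy z hz)
    · have hb' : pvLtB x y = false := by simpa using hb
      simp only [PySem.List.insertBy, hb', Bool.false_eq_true, if_false]
      refine List.pairwise_cons.2 ⟨?_, ih ht⟩
      intro z hz
      rcases (PySem.List.insertBy_mem_iff pvLtB x z t).1 hz with rfl | hz
      · exact pvLex_of_false hb'
      · exact hy z hz

theorem pvFoldl_insertBy_pairwise (L : List (Int × String)) :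
    ∀ acc : List (Int × String), acc.Pairwise pvLexLe →
      (L.foldl (fun acc x => PySem.List.insertBy pvLtB x acc) acc).Pairwise pvLexLe := by
  induction L with
  | nil => intro acc h; simpa using h
  | cons x t ih =>
    intro acc h
    exact ih _ (pvInsertBy_pairwise x acc h)

theorem pvTakeLoop_eq_filter (w : Int) (S : List (Int × String))
    (hp : S.Pairwise pvLexLe) (hmin : ∀ p ∈ S, w ≤ p.1) :
    pvTakeLoop w S = (S.filter (fun p => decide (p.1 = w))).map (fun p => p.2) := by
  induction S with
  | nil => rfl
  | cons x t ih =>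
    rcases List.pairwise_cons.1 hp with ⟨hx, ht⟩
    obtain ⟨s, n⟩ := x
    by_cases hs : s = w
    · subst hs
      simp only [pvTakeLoop, List.filter_cons]
      rw [ih ht (fun p hp' => hmin p (List.mem_cons_of_mem _ hp'))]
      simp
    · have hws : w < s := lt_of_le_of_ne (hmin (s, n) (List.mem_cons_self)) (fun h => hs h.symm)
      have hflt : t.filter (fun p => decide (p.1 = w)) = [] := by
        apply List.filter_eq_nil_iff.2
        intro p hp'
        have hle : pvLexLe (s, n) p := hx p hp'
        have hsp : s ≤ p.1 := by
          rcases hle with h | ⟨h, _⟩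
          · exact le_of_lt h
          · exact le_of_eq h
        simp only [decide_eq_true_eq]
        omega
      simp [pvTakeLoop, hs, hflt]

theorem pvBestFold_some (L : List (Int × String)) :
    ∀ (b : Int) (B0 : List String),
      L.foldl pvBestStep (some b, B0) =
        (some ((L.map (fun p => p.1)).foldl min b),
          (if (L.map (fun p => p.1)).foldl min b = b then B0 else []) ++
            (L.filter (fun p => decide (p.1 = (L.map (fun p => p.1)).foldl min b))).map (fun p => p.2)) := by
  induction L with
  | nil => intro b B0; simp
  | cons x t ih =>
    intro b B0
    obtain ⟨s, n⟩ := x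
    have hmle := PySem.List.foldl_min_le (t.map (fun p => p.1)) (min b s)
    rcases lt_trichotomy s b with hlt | heq | hgt
    · -- s < b : reset to (some s, [n])
      have hstep : pvBestStep (some b, B0) (s, n) = (some s, [n]) := by
        simp [pvBestStep, hlt]
      have hmin : min b s = s := by omega
      have hm_ne : (t.map (fun p => p.1)).foldl min s ≠ b := by
        have := (PySem.List.foldl_min_le (t.map (fun p => p.1)) s).1; omega
      rw [List.foldl_cons, hstep, ih s [n]]
      simp only [List.map_cons, List.foldl_cons, hmin, List.filter_cons, if_neg hm_ne]
      by_cases hsm : (t.map (fun p => p.1)).foldl min s = s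
      · simp [hsm]
      · simp [hsm, Ne.symm hsm]
    · -- s = b : append n when still minimal
      subst heq
      have hstep : pvBestStep (some s, B0) (s, n) = (some s, B0 ++ [n]) := by
        simp [pvBestStep]
      have hmin : min s s = s := by omega
      rw [List.foldl_cons, hstep, ih s (B0 ++ [n])]
      simp only [List.map_cons, List.foldl_cons, hmin, List.filter_cons]
      by_cases hsm : (t.map (fun p => p.1)).foldl min s = s
      · simp [hsm]
      · simp [hsm, Ne.symm hsm]
    · -- b < s : ignore
      have hstep : pvBestStep (some b, B0) (s, n) = (some b, B0) := by
        have h1 : ¬ s < b := by omega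
        have h2 : s ≠ b := by omega
        simp [pvBestStep, h1, h2]
      have hmin : min b s = b := by omega
      have hs_ne : s ≠ (t.map (fun p => p.1)).foldl min b := by
        have := (PySem.List.foldl_min_le (t.map (fun p => p.1)) b).1; omega
      rw [List.foldl_cons, hstep, ih b B0]
      simp [hmin, hs_ne]

theorem pvBestFold_cons (x : Int × String) (t : List (Int × String)) :
    (x :: t).foldl pvBestStep ((none : Option Int), ([] : List String)) =
      (some ((t.map (fun p => p.1)).foldl min x.1),
        ((x :: t).filter (fun p => decide (p.1 = (t.map (fun p => p.1)).foldl min x.1))).map (fun p => p.2)) := by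
  have hstep : pvBestStep ((none : Option Int), ([] : List String)) x = (some x.1, [x.2]) := by
    simp [pvBestStep]
  rw [List.foldl_cons, hstep, pvBestFold_some t x.1 [x.2]]
  simp only [List.filter_cons]
  by_cases hsm : (t.map (fun p => p.1)).foldl min x.1 = x.1
  · simp [hsm]
  · simp [hsm, Ne.symm hsm]

theorem pvCore (L : List (Int × String)) (hnd : L.Nodup) :
    (match PySem.List.sorted2 L (fun t => t.1) (fun t => t.2) with
      | [] => []
      | (w, _) :: _ => pvTakeLoop w (PySem.List.sorted2 L (fun t => t.1) (fun t => t.2))) =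
      PySem.List.sorted (L.foldl pvBestStep ((none : Option Int), ([] : List String))).2 (fun x => x) false := by
  have hpair : (PySem.List.sorted2 L (fun t => t.1) (fun t => t.2)).Pairwise pvLexLe := by
    rw [show PySem.List.sorted2 L (fun t => t.1) (fun t => t.2)
        = L.foldl (fun acc x => PySem.List.insertBy pvLtB x acc) [] from rfl]
    exact pvFoldl_insertBy_pairwise L [] (by simp)
  have hperm : (PySem.List.sorted2 L (fun t => t.1) (fun t => t.2)).Perm L :=
    PySem.List.sorted2_perm L _ _ false
  cases hSc : PySem.List.sorted2 L (fun t => t.1) (fun t => t.2) with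
  | nil =>
    have hL : L = [] := by
      have := hperm; rw [hSc] at this; exact (List.Perm.nil_eq this).symm
    subst hL
    simp [PySem.List.sorted]
  | cons hd tl =>
    obtain ⟨w, nm⟩ := hd
    -- L is nonempty
    obtain ⟨x, t, rfl⟩ : ∃ x t, L = x :: t := by
      cases L with
      | nil => exact absurd (hperm.symm.nil_eq) (by rw [hSc]; simp)
      | cons a b => exact ⟨a, b, rfl⟩
    rw [hSc] at hpair hperm
    -- the running minimum of B
    set m := (t.map (fun p => p.1)).foldl min x.1 with hm
    have hmle := PySem.List.foldl_min_le (t.map (fun p => p.1)) x.1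
    have hm_le : ∀ p ∈ x :: t, m ≤ p.1 := by
      intro p hp
      rcases List.mem_cons.1 hp with rfl | hp
      · exact hmle.1
      · exact hmle.2 p.1 (List.mem_map_of_mem hp)
    have hw_le : ∀ p ∈ (w, nm) :: tl, w ≤ p.1 := by
      intro p hp
      rcases List.mem_cons.1 hp with rfl | hp
      · exact le_refl _
      · rcases (List.pairwise_cons.1 hpair).1 p hp with h | ⟨h, _⟩
        · exact le_of_lt h
        · exact le_of_eq h
    have hwm : w = m := by
      have h1 : m ≤ w := hm_le (w, nm) (hperm.mem_iff.1 (List.mem_cons_self))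
      have h2 : w ≤ m := by
        rcases PySem.List.foldl_min_mem (t.map (fun p => p.1)) x.1 with h | h
        · exact le_trans (hw_le ⟨x.1, x.2⟩ (by
            have : x ∈ (w, nm) :: tl := hperm.mem_iff.2 (List.mem_cons_self)
            simpa using this)) (le_of_eq (hm ▸ h).symm)
        · obtain ⟨p, hp, hp1⟩ := List.mem_map.1 h
          have hpS : p ∈ (w, nm) :: tl := hperm.mem_iff.2 (List.mem_cons_of_mem _ hp)
          have := hw_le p hpS
          omega
      omega
    -- A's loop is the filter of the sorted list at the minimum weight
    have hA : pvTakeLoop w ((w, nm) :: tl) =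
        (((w, nm) :: tl).filter (fun p => decide (p.1 = w))).map (fun p => p.2) :=
      pvTakeLoop_eq_filter w _ hpair hw_le
    -- B's bucket
    rw [pvBestFold_cons x t]
    show pvTakeLoop w ((w, nm) :: tl) = _
    rw [hA, ← hm, ← hwm]
    -- sorted(bucket) equals the already ordered filtered prefix
    have hq := hperm.filter (fun p => decide (p.1 = w))
    refine (PySem.List.sorted_eq_of_perm_of_pairwise_lt
        ((List.filter (fun p => decide (p.1 = w)) (x :: t)).map (fun p => p.2))
        ((List.filter (fun p => decide (p.1 = w)) ((w, nm) :: tl)).map (fun p => p.2))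
        (fun s => s) (hq.map _) ?_).symm
    · -- strict increase of the names in the minimal bucket
      have hndS : ((w, nm) :: tl).Nodup := hperm.symm.nodup hnd
      have hpf : (((w, nm) :: tl).filter (fun p => decide (p.1 = w))).Pairwise
          (fun a b => pvLexLe a b ∧ a ≠ b) := by
        exact ((hpair.and hndS).filter _)
      rw [List.pairwise_map]
      refine hpf.imp_of_mem ?_
      intro a b ha hb hab
      have ha1 : a.1 = w := by simpa using (List.of_mem_filter ha)
      have hb1 : b.1 = w := by simpa using (List.of_mem_filter hb)
      rcases hab.1 with h | ⟨h, hle⟩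
      · omega
      · refine lt_of_le_of_ne hle ?_
        intro hsnd
        exact hab.2 (Prod.ext (by omega) hsnd)


theorem pvMain (list1 list2 : List String) : findRestaurant list1 list2 = findRestaurant_alt list1 list2 := by
  simp only [findRestaurant, findRestaurant_alt]
  set D : PySem.Dict String Int :=
    (PySem.List.enumerate list1).foldl (fun d p => d.insert p.2 p.1) PySem.Dict.empty with hD
  rw [PySem.List.foldl_append_if (fun p => D.contains p.2)
      (fun p => (D.getD p.2 0 + p.1, p.2)) (PySem.List.enumerate list2) []]
  rw [PySem.List.foldl_if_eq_foldl_filter (fun p => D.contains p.2)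
      (fun st p => pvBestStep st (D.getD p.2 0 + p.1, p.2)) (PySem.List.enumerate list2)
      ((none : Option Int), ([] : List String))]
  rw [← List.foldl_map (f := fun p : Int × String => (D.getD p.2 0 + p.1, p.2)) (g := pvBestStep)]
  simp only [List.nil_append]
  apply pvCore
  apply List.Nodup.map
  · intro p q h
    have h1 := congrArg Prod.snd h
    have h2 := congrArg Prod.fst h
    simp only at h1 h2
    rw [h1] at h2
    exact Prod.ext (by omega) h1
  · exact ((PySem.List.pairwise_lt_enumerate list2 0).imp
      (fun {a b} hlt => by intro he; rw [he] at hlt; exact lt_irrefl _ hlt)).filter _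

-- ===== VERDICT (by name: the statement is the Claim_ definition above) =====
theorem findRestaurant_spec : Claim_equal_findRestaurant := by
  intro list1 list2 _
  unfold Spec_findRestaurant
  exact pvMain list1 list2
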